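-- pv_equiv track=rewrite | github.com/rashmi-fit/100-daysOf-Python_challenge | tree_learn.py | solve
-- ===== SOURCE A (Python) =====
-- def solve(nums):
--    res = sum(nums)
--    while len(nums) > 1:
--       i = nums.index(min(nums))
--       left = nums[i - 1] if i > 0 else float("inf")
--       right = nums[i + 1] if i < len(nums) - 1 else float("inf")
--       res += min(left, right) * nums.pop(i)
--
--    return res
-- ===== SOURCE B (Python) =====
-- def solve(nums):
--     res = sum(nums)
--     stack = []
--     for a in nums:
--         while stack and stack[-1] <= a:
--             t = stack.pop()
--             res += t * (min(a, stack[-1]) if stack else a)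
--         stack.append(a)
--     while len(stack) > 1:
--         t = stack.pop()
--         res += t * stack[-1]
--     return res
-- ===== Notes on version B (the rewrite author's own statement) =====
-- stated objective: faster
-- what changed: Replaces A's repeated scan-for-minimum-and-pop loop (each iteration calls min, index and pop on the remaining list) with a single left-to-right pass over a monotonic decreasing stack that accumulates the same min-neighbor products.
import Mathlib
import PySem

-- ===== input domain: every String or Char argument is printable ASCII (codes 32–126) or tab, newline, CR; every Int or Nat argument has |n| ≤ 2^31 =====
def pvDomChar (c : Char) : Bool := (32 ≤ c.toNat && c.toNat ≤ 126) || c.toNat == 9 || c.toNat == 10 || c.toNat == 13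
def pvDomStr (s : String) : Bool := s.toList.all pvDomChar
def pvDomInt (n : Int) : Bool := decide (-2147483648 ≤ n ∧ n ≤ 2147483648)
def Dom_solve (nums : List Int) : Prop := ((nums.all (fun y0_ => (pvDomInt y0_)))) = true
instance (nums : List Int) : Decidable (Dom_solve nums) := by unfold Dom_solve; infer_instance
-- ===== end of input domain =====

-- B replaces A's repeated scan-for-min-and-pop (O(n^2)) by a one-pass monotonic stack (O(n));
-- equivalence of the RETURN values is proved (Python A additionally empties its argument list in place, B does not mutate it).

-- ===== PORT A =====
-- float("inf") is modeled as `none : Option Int`; it is only ever fed to min and discarded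
-- (the chosen factor is always finite when the loop body runs), so this is exact.
def infMin : Option Int → Option Int → Option Int
  | none, y => y
  | some a, none => some a
  | some a, some b => some (min a b)

-- the while loop; fuel = initial length (each iteration pops exactly one element)
def solveLoop : Nat → List Int → Int → Int
  | 0, _, res => res
  | fuel+1, nums, res =>
    if nums.length > 1 then
      match PySem.List.min? nums (fun x => x) with
      | none => res  -- unreachable: nums ≠ []
      | some m =>
        match PySem.List.index? nums m with
        | none => res  -- unreachable: m ∈ nums
        | some i =>
          let left : Option Int := if (i : Int) > 0 then PySem.List.pyGet? nums ((i : Int) - 1) else none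
          let right : Option Int := if (i : Int) < (nums.length : Int) - 1 then PySem.List.pyGet? nums ((i : Int) + 1) else none
          match PySem.List.pop? nums (i : Int), infMin left right with
          | some (v, rest), some c => solveLoop fuel rest (res + c * v)
          | _, _ => res  -- unreachable: i in range, and len > 1 makes one side finite
    else res

def solve (nums : List Int) : Int := solveLoop nums.length nums nums.sum

-- ===== PORT B =====
-- stack is kept top-first (Lean head = Python stack[-1])
def popPhase : List Int → Int → Int → List Int × Int
  | [], _, res => ([], res)
  | t :: rest, a, res =>
    if t ≤ a then
      popPhase rest a (res + t * (match rest with | [] => a | u :: _ => min a u))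
    else (t :: rest, res)

def pushStep (st : List Int × Int) (a : Int) : List Int × Int :=
  let p := popPhase st.1 a st.2
  (a :: p.1, p.2)

def drain : List Int → Int → Int
  | t :: u :: rest, res => drain (u :: rest) (res + t * u)
  | _, res => res

def solve_alt (nums : List Int) : Int :=
  let st := nums.foldl pushStep ([], nums.sum)
  drain st.1 st.2

-- ===== PRECONDITION & SPEC =====
def Spec_solve (nums : List Int) (out : Int) : Prop := out = solve_alt nums
instance (nums : List Int) (out : Int) : Decidable (Spec_solve nums out) := by unfold Spec_solve; infer_instance

-- ===== CLAIM (what is proved, stated in full; the proofs are below) =====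
def Claim_equal_solve : Prop := ∀ (nums : List Int), Dom_solve nums → Spec_solve nums (solve nums)

-- ===== LEMMAS AND PROOFS =====

-- the coefficient A multiplies the popped minimum by, as a function of the split
def comb (l r : List Int) : Int :=
  match l.getLast?, r.head? with
  | some t, some a => min t a
  | some t, none => t
  | none, some a => a
  | none, none => 0

def run (st : List Int × Int) (l : List Int) : List Int × Int := l.foldl pushStep st

lemma popPhase_acc (s : List Int) (a res c : Int) :
    popPhase s a (res + c) = ((popPhase s a res).1, (popPhase s a res).2 + c) := by
  induction s generalizing res with
  | nil => simp [popPhase]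
  | cons t rest ih =>
    by_cases h : t ≤ a
    · simp only [popPhase, if_pos h]
      rw [add_right_comm res c]
      exact ih _
    · simp [popPhase, if_neg h]

lemma pushStep_acc (s : List Int) (a res c : Int) :
    pushStep (s, res + c) a = ((pushStep (s, res) a).1, (pushStep (s, res) a).2 + c) := by
  simp [pushStep, popPhase_acc]

lemma run_acc (l : List Int) (s : List Int) (res c : Int) :
    run (s, res + c) l = ((run (s, res) l).1, (run (s, res) l).2 + c) := by
  induction l generalizing s res with
  | nil => simp [run]
  | cons a l ih =>
    simp only [run, List.foldl_cons]
    rw [pushStep_acc]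
    have := ih (pushStep (s, res) a).1 (pushStep (s, res) a).2
    simpa [run] using this

lemma popPhase_subset (s : List Int) (a res : Int) :
    ∀ x ∈ (popPhase s a res).1, x ∈ s := by
  induction s generalizing res with
  | nil => simp [popPhase]
  | cons t rest ih =>
    by_cases h : t ≤ a
    · simp only [popPhase, if_pos h]
      intro x hx
      exact List.mem_cons_of_mem _ (ih _ x hx)
    · simp [popPhase, if_neg h]

lemma run_stack_mem (l : List Int) (s : List Int) (res : Int) :
    ∀ x ∈ (run (s, res) l).1, x ∈ s ∨ x ∈ l := by
  induction l generalizing s res with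
  | nil => intro x hx; exact Or.inl (by simpa [run] using hx)
  | cons a l ih =>
    intro x hx
    simp only [run, List.foldl_cons] at hx
    have : pushStep (s, res) a = ((pushStep (s, res) a).1, (pushStep (s, res) a).2) := rfl
    rw [this] at hx
    rcases ih _ _ x hx with h | h
    · simp only [pushStep] at h
      rcases List.mem_cons.1 h with h | h
      · exact Or.inr (by simp [h])
      · exact Or.inl (popPhase_subset s a res x h)
    · exact Or.inr (List.mem_cons_of_mem _ h)

-- stack after running l from the empty stack: empty iff l = [], and its top is l's last element
lemma run_concat (st : List Int × Int) (l : List Int) (a : Int) :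
    run st (l ++ [a]) = pushStep (run st l) a := by
  simp [run, List.foldl_append]

lemma run_head (l : List Int) (res : Int) :
    (run ([], res) l).1.head? = l.getLast? := by
  rcases List.eq_nil_or_concat l with rfl | ⟨l', a, rfl⟩
  · simp [run]
  · rw [List.concat_eq_append, run_concat]
    have h1 : (pushStep (run ([], res) l') a).1
        = a :: (popPhase (run ([], res) l').1 a (run ([], res) l').2).1 := rfl
    simp [h1]

-- KEY LEMMA: removing the first global minimum m commutes with the stack computation
lemma key (l r : List Int) (m res : Int)
    (hl : ∀ x ∈ l, m < x) (hr : ∀ x ∈ r, m ≤ x) (hne : l ≠ [] ∨ r ≠ []) :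
    drain (run ([], res) (l ++ m :: r)).1 (run ([], res) (l ++ m :: r)).2
      = drain (run ([], res + m * comb l r) (l ++ r)).1 (run ([], res + m * comb l r) (l ++ r)).2 := by
  have hmem := run_stack_mem l [] res
  have hhd := run_head l res
  obtain ⟨s, res1, hrun⟩ : ∃ s res1, run ([], res) l = (s, res1) := ⟨_, _, rfl⟩
  rw [hrun] at hmem hhd
  -- pushing m onto the stack left by l pops nothing (everything on it came from l, hence > m)
  have hpop_m : popPhase s m res1 = (s, res1) := by
    cases s with
    | nil => rfl
    | cons t s' =>
      have ht : t ∈ l := by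
        rcases hmem t (List.mem_cons_self) with h | h
        · cases h
        · exact h
      have : ¬ t ≤ m := not_le.mpr (hl t ht)
      simp [popPhase, this]
  have hsplit : run ([], res) (l ++ m :: r) = run (m :: s, res1) r := by
    simp only [run, List.foldl_append, List.foldl_cons]
    rw [show (List.foldl pushStep ([], res) l) = (s, res1) from hrun]
    simp [pushStep, hpop_m]
  rw [hsplit]
  cases r with
  | nil =>
    have hlne : l ≠ [] := hne.resolve_right (fun h => h rfl)
    obtain ⟨t, hlast⟩ : ∃ t, l.getLast? = some t := by
      cases hx : l.getLast? with
      | none => exact absurd (List.getLast?_eq_none_iff.mp hx) hlne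
      | some t => exact ⟨t, rfl⟩
    rw [hlast] at hhd
    obtain ⟨s', rfl⟩ : ∃ s', s = t :: s' := by
      cases s with
      | nil => simp at hhd
      | cons u su => exact ⟨su, by simp_all⟩
    have hcomb : comb l [] = t := by simp [comb, hlast]
    rw [hcomb, List.append_nil]
    have hracc : run ([], res + m * t) l = (t :: s', res1 + m * t) := by
      have := run_acc l [] res (m * t)
      rw [hrun] at this; exact this
    rw [hracc]
    simp [run, drain]
  | cons a r' =>
    have ha : m ≤ a := hr a List.mem_cons_self
    have hcombv : popPhase (m :: s) a res1 = popPhase s a (res1 + m * comb l (a :: r')) := by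
      cases hlast : l.getLast? with
      | none =>
        have hs0 : s = [] := by rw [hlast] at hhd; exact List.head?_eq_none_iff.mp hhd
        subst hs0
        simp [popPhase, ha, comb, hlast]
      | some t =>
        rw [hlast] at hhd
        obtain ⟨s', rfl⟩ : ∃ s', s = t :: s' := by
          cases s with
          | nil => simp at hhd
          | cons u su => exact ⟨su, by simp_all⟩
        simp [popPhase, ha, comb, hlast, min_comm a t]
    have hpush : pushStep (m :: s, res1) a = pushStep (s, res1 + m * comb l (a :: r')) a := by
      simp [pushStep, hcombv]
    have hrhs : run ([], res + m * comb l (a :: r')) (l ++ a :: r')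
        = run (s, res1 + m * comb l (a :: r')) (a :: r') := by
      simp only [run, List.foldl_append]
      have := run_acc l [] res (m * comb l (a :: r'))
      rw [hrun] at this
      rw [show (List.foldl pushStep ([], res + m * comb l (a :: r')) l) = (s, res1 + m * comb l (a :: r')) from this]
    rw [hrhs]
    simp only [run, List.foldl_cons, hpush]

-- A's loop equals B's stack computation
lemma eraseIdx_append_cons (l r : List Int) (m : Int) :
    (l ++ m :: r).eraseIdx l.length = l ++ r := by
  induction l with
  | nil => simp
  | cons x xs ih => simpa [List.eraseIdx] using ih

lemma hleft_eq (pre suf : List Int) (m : Int) :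
    (if ((pre.length : Int)) > 0 then PySem.List.pyGet? (pre ++ m :: suf) ((pre.length : Int) - 1) else none)
      = pre.getLast? := by
  rcases List.eq_nil_or_concat pre with rfl | ⟨p, t, rfl⟩
  · simp
  · rw [List.concat_eq_append]
    rw [if_pos (by simp)]
    rw [show (((p ++ [t]).length : Int) - 1) = ((p.length : Nat) : Int) by simp]
    rw [PySem.List.pyGet?_natCast]
    simp

lemma hright_eq (pre suf : List Int) (m : Int) :
    (if ((pre.length : Int)) < (((pre ++ m :: suf).length : Int)) - 1 then PySem.List.pyGet? (pre ++ m :: suf) ((pre.length : Int) + 1) else none)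
      = suf.head? := by
  cases suf with
  | nil => rw [if_neg (by simp)]; rfl
  | cons a suf' =>
    rw [if_pos (by simp only [List.length_append, List.length_cons]; push_cast; omega)]
    rw [show ((pre.length : Int) + 1) = ((pre.length : Int) + ((1 : Nat) : Int)) by simp]
    rw [PySem.List.pyGet?_append_right]
    simp

lemma hinf_eq (pre suf : List Int) (hne : pre ≠ [] ∨ suf ≠ []) :
    infMin pre.getLast? suf.head? = some (comb pre suf) := by
  cases hp : pre.getLast? with
  | none =>
    cases hs : suf.head? with
    | none =>
      exact absurd (List.getLast?_eq_none_iff.mp hp)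
        (hne.resolve_right (fun h => h (List.head?_eq_none_iff.mp hs)))
    | some a => simp [infMin, comb, hp, hs]
  | some t =>
    cases hs : suf.head? with
    | none => simp [infMin, comb, hp, hs]
    | some a => simp [infMin, comb, hp, hs]

lemma stepA (fuel : Nat) (pre suf : List Int) (m res : Int)
    (hmin : PySem.List.min? (pre ++ m :: suf) (fun x => x) = some m)
    (hidx : PySem.List.index? (pre ++ m :: suf) m = some pre.length)
    (hlong : (pre ++ m :: suf).length > 1) :
    solveLoop (fuel + 1) (pre ++ m :: suf) res
      = solveLoop fuel (pre ++ suf) (res + comb pre suf * m) := by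
  have hlt : pre.length < (pre ++ m :: suf).length := by simp
  have hpop : PySem.List.pop? (pre ++ m :: suf) ((pre.length : Nat) : Int) = some (m, pre ++ suf) := by
    rw [PySem.List.pop?_natCast _ _ hlt]
    simp [eraseIdx_append_cons]
  have hne : pre ≠ [] ∨ suf ≠ [] := by
    rcases pre with _ | ⟨x, xs⟩
    · rcases suf with _ | ⟨y, ys⟩
      · simp at hlong
      · exact Or.inr (by simp)
    · exact Or.inl (by simp)
  conv_lhs => rw [solveLoop]
  rw [if_pos hlong]
  simp only [hmin, hidx, hleft_eq, hright_eq, hinf_eq pre suf hne, hpop]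

lemma main_loop (fuel : Nat) : ∀ (nums : List Int) (res : Int), nums.length ≤ fuel →
    solveLoop fuel nums res = drain (run ([], res) nums).1 (run ([], res) nums).2 := by
  induction fuel with
  | zero =>
    intro nums res hlen
    have h0 : nums = [] := List.eq_nil_of_length_eq_zero (Nat.le_zero.mp hlen)
    subst h0; simp [solveLoop, run, drain]
  | succ fuel ih =>
    intro nums res hlen
    by_cases hlong : nums.length > 1
    · have hne : nums ≠ [] := by intro h; subst h; simp at hlong
      obtain ⟨m, hmin⟩ : ∃ m, PySem.List.min? nums (fun x => x) = some m := by
        cases h : PySem.List.min? nums (fun x => x) with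
        | none => exact absurd ((PySem.List.min?_eq_none_iff _ _).mp h) hne
        | some m => exact ⟨m, rfl⟩
      have hmle : ∀ y ∈ nums, m ≤ y := PySem.List.min?_isMin hmin
      obtain ⟨i, hidx⟩ : ∃ i, PySem.List.index? nums m = some i := by
        cases h : PySem.List.index? nums m with
        | none => exact absurd ((PySem.List.index?_eq_none_iff _ _).mp h) (by simp [PySem.List.min?_mem hmin])
        | some i => exact ⟨i, rfl⟩
      obtain ⟨pre, suf, hsplit, hlenpre, hnotmem⟩ := (PySem.List.index?_eq_some_iff _ _ _).mp hidx
      subst hsplit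
      subst hlenpre
      have hl' : ∀ x ∈ pre, m < x := by
        intro x hx
        refine lt_of_le_of_ne (hmle x (List.mem_append_left _ hx)) ?_
        intro e
        exact hnotmem (e ▸ hx)
      have hr' : ∀ x ∈ suf, m ≤ x := fun x hx =>
        hmle x (List.mem_append_right _ (List.mem_cons_of_mem _ hx))
      have hne' : pre ≠ [] ∨ suf ≠ [] := by
        rcases pre with _ | ⟨x, xs⟩
        · rcases suf with _ | ⟨y, ys⟩
          · simp at hlong
          · exact Or.inr (by simp)
        · exact Or.inl (by simp)
      have hlen' : (pre ++ suf).length ≤ fuel := by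
        simp at hlen ⊢; omega
      rw [stepA fuel pre suf m res hmin hidx hlong, ih _ _ hlen',
        mul_comm (comb pre suf) m, (key pre suf m res hl' hr' hne')]
    · have hle1 : nums.length ≤ 1 := Nat.le_of_not_lt hlong
      cases nums with
      | nil => simp [solveLoop, run, drain]
      | cons x xs =>
        cases xs with
        | nil => simp [solveLoop, run, pushStep, popPhase, drain]
        | cons y ys => simp at hle1

theorem solve_eq (nums : List Int) : solve nums = solve_alt nums := by
  have h := main_loop nums.length nums nums.sum le_rfl
  simpa [solve, solve_alt, run] using h

-- ===== VERDICT (by name: the statement is the Claim_ definition above) =====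
theorem solve_spec : Claim_equal_solve := by
  intro nums _
  unfold Spec_solve
  exact solve_eq nums
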